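-- pv_equiv track=rewrite | github.com/AbdussamadYisau/ds-and-algos | Arrays/maxSumKLessThanX.py | bruteMaxSumKLessThanX
-- ===== SOURCE A (Python) =====
-- def bruteMaxSumKLessThanX(arr, k, x):
--
--     n = len(arr)
--
--     if n < k:
--         return -1
--
--     max_sum = 0
--     for i in range(n-k+1):
--         current_sum = 0
--         for j in range(k):
--             current_sum = current_sum + arr[i+j]
--         if current_sum < x and current_sum > max_sum:
--             max_sum = current_sum
--     return max_sum
-- ===== SOURCE B (Python) =====
-- def bruteMaxSumKLessThanX(arr, k, x):
--     n = len(arr)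
--     if n < k:
--         return -1
--     max_sum = 0
--     s = sum(arr[:k])
--     if s < x and s > max_sum:
--         max_sum = s
--     for i in range(k, n):
--         s += arr[i] - arr[i - k]
--         if s < x and s > max_sum:
--             max_sum = s
--     return max_sum
-- ===== Notes on version B (the rewrite author's own statement) =====
-- stated objective: faster
-- what changed: Replaced the O(n*k) recompute-each-window double loop with an O(n) sliding window that updates the running sum by adding the entering element and subtracting the leaving one; Pre_ excludes negative window sizes k, outside the task's natural domain, where A's value 0 is an accident of its empty inner loop and B's sliding window raises IndexError.
-- outside the precondition, e.g. on bruteMaxSumKLessThanX([5, 3], -1, 100): A returns 0, B raises IndexError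
import Mathlib
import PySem

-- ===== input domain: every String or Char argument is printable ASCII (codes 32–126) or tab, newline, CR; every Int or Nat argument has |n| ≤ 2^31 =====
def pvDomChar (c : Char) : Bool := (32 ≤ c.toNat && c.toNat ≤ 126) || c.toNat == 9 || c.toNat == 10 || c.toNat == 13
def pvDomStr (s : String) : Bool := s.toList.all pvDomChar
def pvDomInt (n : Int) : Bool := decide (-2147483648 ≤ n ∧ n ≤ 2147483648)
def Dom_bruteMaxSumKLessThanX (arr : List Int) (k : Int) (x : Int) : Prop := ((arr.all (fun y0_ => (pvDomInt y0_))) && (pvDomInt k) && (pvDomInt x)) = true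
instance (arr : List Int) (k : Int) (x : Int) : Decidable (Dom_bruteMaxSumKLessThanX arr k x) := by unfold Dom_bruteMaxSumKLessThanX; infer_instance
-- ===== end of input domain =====

-- B replaces A's O(n*k) recompute-each-window double loop by an O(n) sliding window (faster, measured).

-- ===== PORT A =====
-- arr[i+j] is always in range under the guard n < k → return -1 together with 0 ≤ k (Pre_),
-- so pyGetD with default 0 is exact there.
def bruteMaxSumKLessThanX (arr : List Int) (k : Int) (x : Int) : Int :=
  let n : Int := arr.length
  if n < k then -1
  else
    (PySem.List.pyRange 0 (n - k + 1) 1).foldl (fun max_sum i =>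
      let current_sum :=
        (PySem.List.pyRange 0 k 1).foldl (fun c j => c + PySem.List.pyGetD arr (i + j) 0) 0
      if current_sum < x ∧ current_sum > max_sum then current_sum else max_sum) 0

-- ===== PORT B =====
-- arr[i] and arr[i-k] are in range for k ≤ i < n with 0 ≤ k (Pre_), so pyGetD with default 0 is exact.
def bruteMaxSumKLessThanX_alt (arr : List Int) (k : Int) (x : Int) : Int :=
  let n : Int := arr.length
  if n < k then -1
  else
    let s0 : Int := (PySem.List.slice arr none (some k)).sum
    let m0 : Int := if s0 < x ∧ s0 > 0 then s0 else 0
    ((PySem.List.pyRange k n 1).foldl (fun (p : Int × Int) i =>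
        let s := p.1 + PySem.List.pyGetD arr i 0 - PySem.List.pyGetD arr (i - k) 0
        (s, if s < x ∧ s > p.2 then s else p.2)) (s0, m0)).2

-- ===== PRECONDITION & SPEC =====
-- Pre_ restricts to the task's natural domain of nonnegative window sizes: for k < 0 A's
-- returned 0 is an accident of its empty inner loop and B's sliding window raises IndexError.
def Pre_bruteMaxSumKLessThanX (arr : List Int) (k : Int) (x : Int) : Prop := 0 ≤ k
instance (arr : List Int) (k : Int) (x : Int) : Decidable (Pre_bruteMaxSumKLessThanX arr k x) := by unfold Pre_bruteMaxSumKLessThanX; infer_instance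
def pvWitness_bruteMaxSumKLessThanX : List Int × Int × Int := ([2, 5, -1, 7, 3], 3, 12)
def Spec_bruteMaxSumKLessThanX (arr : List Int) (k : Int) (x : Int) (out : Int) : Prop := out = bruteMaxSumKLessThanX_alt arr k x
instance (arr : List Int) (k : Int) (x : Int) (out : Int) : Decidable (Spec_bruteMaxSumKLessThanX arr k x out) := by unfold Spec_bruteMaxSumKLessThanX; infer_instance

-- ===== CLAIM (what is proved, stated in full; the proofs are below) =====
def Claim_equal_bruteMaxSumKLessThanX : Prop := ∀ (arr : List Int) (k : Int) (x : Int), Dom_bruteMaxSumKLessThanX arr k x → Pre_bruteMaxSumKLessThanX arr k x → Spec_bruteMaxSumKLessThanX arr k x (bruteMaxSumKLessThanX arr k x)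

-- ===== LEMMAS AND PROOFS =====

-- sum of the window of length K starting at position i
def pvWsum (arr : List Int) (K i : Nat) : Int := ((arr.drop i).take K).sum

-- the shared update of the running maximum
def pvUpd (x m s : Int) : Int := if s < x ∧ s > m then s else m

lemma pvWsum_succ (arr : List Int) (K i : Nat) (h : i + K < arr.length) :
    pvWsum arr K (i + 1) = pvWsum arr K i + arr.getD (i + K) 0 - arr.getD i 0 := by
  have hi : i < arr.length := by omega
  have h1 : ((arr.drop i).take (K + 1)).sum = arr.getD i 0 + pvWsum arr K (i + 1) := by
    conv_lhs => rw [List.drop_eq_getElem_cons hi, List.take_succ_cons, List.sum_cons]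
    rw [List.getD_eq_getElem arr 0 hi, pvWsum]
  have h2 : ((arr.drop i).take (K + 1)).sum = pvWsum arr K i + arr.getD (i + K) 0 := by
    have hlen : K < (arr.drop i).length := by simp; omega
    rw [List.take_add_one]
    simp [pvWsum, List.getElem?_eq_getElem hlen, List.getD, List.getElem?_eq_getElem h]
  omega

lemma pvInnerA (arr : List Int) (K i : Nat) (h : i + K ≤ arr.length) :
    (List.range K).foldl (fun c j => c + arr.getD (i + j) 0) 0 = pvWsum arr K i := by
  induction K with
  | zero => simp [pvWsum]
  | succ K ih =>
    have hK : i + K ≤ arr.length := by omega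
    have hlt : i + K < arr.length := by omega
    rw [List.range_succ, List.foldl_append, ih hK]
    have hlen : K < (arr.drop i).length := by simp; omega
    simp [pvWsum, List.take_add_one, List.getElem?_eq_getElem hlen, List.getD,
      List.getElem?_eq_getElem hlt]

lemma pvBfold (arr : List Int) (x : Int) (K : Nat) :
    ∀ (r c : Nat) (m : Int), c + K + r ≤ arr.length →
    (List.range r).foldl (fun (p : Int × Int) t =>
        let s := p.1 + arr.getD (K + (c + t)) 0 - arr.getD (c + t) 0
        (s, pvUpd x p.2 s)) (pvWsum arr K c, m)
    = (pvWsum arr K (c + r),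
       ((List.range r).map (fun t => pvWsum arr K (c + t + 1))).foldl (pvUpd x) m) := by
  intro r
  induction r with
  | zero => simp
  | succ r ih =>
    intro c m h
    rw [List.range_succ, List.foldl_append, List.map_append, List.foldl_append,
      ih c m (by omega)]
    have hlt : c + r + K < arr.length := by omega
    have hs : pvWsum arr K (c + r) + arr.getD (K + (c + r)) 0 - arr.getD (c + r) 0
        = pvWsum arr K (c + r + 1) := by
      rw [pvWsum_succ arr K (c + r) hlt]
      have : c + r + K = K + (c + r) := by omega
      rw [this]
    simp only [List.foldl_cons, List.foldl_nil, List.map_cons, List.map_nil, hs, Nat.add_succ]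

-- ===== VERDICT (by name: the statement is the Claim_ definition above) =====
theorem bruteMaxSumKLessThanX_spec : Claim_equal_bruteMaxSumKLessThanX := by
  intro arr k x _ hk
  unfold Spec_bruteMaxSumKLessThanX bruteMaxSumKLessThanX bruteMaxSumKLessThanX_alt
  by_cases hnk : (arr.length : Int) < k
  · simp [hnk]
  · simp only [hnk, if_false]
    set N := arr.length with hN
    set K := k.toNat with hK
    have hkK : k = (K : Int) := (Int.toNat_of_nonneg hk).symm
    have hKN : K ≤ N := by omega
    -- A side
    have hA : (PySem.List.pyRange 0 ((N : Int) - k + 1) 1).foldl (fun max_sum i =>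
        let current_sum :=
          (PySem.List.pyRange 0 k 1).foldl (fun c j => c + PySem.List.pyGetD arr (i + j) 0) 0
        if current_sum < x ∧ current_sum > max_sum then current_sum else max_sum) 0
        = ((List.range (N - K + 1)).map (fun i => pvWsum arr K i)).foldl (pvUpd x) 0 := by
      have hcast : (N : Int) - k + 1 = ((N - K + 1 : Nat) : Int) := by omega
      rw [hcast, PySem.List.pyRange_zero_nat, List.foldl_map, List.foldl_map]
      apply PySem.List.foldl_congr_mem
      intro acc i hi
      have hiN : i ≤ N - K := by
        have := List.mem_range.mp hi; omega
      have hinner : (PySem.List.pyRange 0 k 1).foldl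
          (fun c j => c + PySem.List.pyGetD arr ((i : Int) + j) 0) 0 = pvWsum arr K i := by
        rw [hkK, PySem.List.pyRange_zero_nat, List.foldl_map]
        rw [← pvInnerA arr K i (by omega)]
        apply PySem.List.foldl_congr_mem
        intro c j _
        have : (i : Int) + (j : Int) = ((i + j : Nat) : Int) := by push_cast; ring
        rw [this, PySem.List.pyGetD_natCast]
      simp only [hinner, pvUpd]
    rw [hA]
    -- B side
    have hs0 : (PySem.List.slice arr none (some k)).sum = pvWsum arr K 0 := by
      rw [PySem.List.slice_to arr hk, pvWsum, List.drop_zero, hK]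
    have hB : (PySem.List.pyRange k (N : Int) 1).foldl (fun (p : Int × Int) i =>
        let s := p.1 + PySem.List.pyGetD arr i 0 - PySem.List.pyGetD arr (i - k) 0
        (s, if s < x ∧ s > p.2 then s else p.2))
        (pvWsum arr K 0, pvUpd x 0 (pvWsum arr K 0))
        = (pvWsum arr K (0 + (N - K)),
           ((List.range (N - K)).map (fun t => pvWsum arr K (0 + t + 1))).foldl (pvUpd x)
             (pvUpd x 0 (pvWsum arr K 0))) := by
      rw [PySem.List.pyRange_one k (N : Int), List.foldl_map]
      have hlen : ((N : Int) - k).toNat = N - K := by omega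
      rw [hlen]
      rw [← pvBfold arr x K (N - K) 0 (pvUpd x 0 (pvWsum arr K 0)) (by omega)]
      apply PySem.List.foldl_congr_mem
      intro p t _
      have h1 : k + (t : Int) = ((K + t : Nat) : Int) := by omega
      have h2 : ((K + t : Nat) : Int) - k = ((t : Nat) : Int) := by push_cast; omega
      simp only [h1, h2, PySem.List.pyGetD_natCast, pvUpd, Nat.zero_add]
    rw [hs0]
    rw [show (if pvWsum arr K 0 < x ∧ pvWsum arr K 0 > 0 then pvWsum arr K 0 else 0)
        = pvUpd x 0 (pvWsum arr K 0) from rfl]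
    rw [hB]
    -- both sides are the fold of pvUpd over the successive window sums
    rw [List.range_succ_eq_map, List.map_cons, List.foldl_cons, List.foldl_map, List.foldl_map]
    simp only [pvUpd, Nat.zero_add, Nat.succ_eq_add_one, List.foldl_map]
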